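-- pv_equiv track=rewrite | github.com/JanakiRaaman/GRNN | GRNN.py | biascount
-- ===== SOURCE A (Python) =====
-- def biascount(arr):
--     neg=0
--     pos=0
--     for i in arr:
--         if(i<0):
--             neg+=1
--         else:
--             pos+=1
--     if(neg>pos):
--         return 0
--     else:
--         return 1
-- ===== SOURCE B (Python) =====
-- def biascount(arr):
--     if not arr:
--         return 1
--     s = sorted(arr)
--     return 0 if s[len(arr) // 2] < 0 else 1
-- ===== Notes on version B (the rewrite author's own statement) =====
-- stated objective: alternative
-- what changed: Instead of counting negatives against non-negatives, B sorts the list and inspects the single median-position element s[len//2]: it is negative exactly when negatives form a strict majority, so no counters are kept at all.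
import Mathlib
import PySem

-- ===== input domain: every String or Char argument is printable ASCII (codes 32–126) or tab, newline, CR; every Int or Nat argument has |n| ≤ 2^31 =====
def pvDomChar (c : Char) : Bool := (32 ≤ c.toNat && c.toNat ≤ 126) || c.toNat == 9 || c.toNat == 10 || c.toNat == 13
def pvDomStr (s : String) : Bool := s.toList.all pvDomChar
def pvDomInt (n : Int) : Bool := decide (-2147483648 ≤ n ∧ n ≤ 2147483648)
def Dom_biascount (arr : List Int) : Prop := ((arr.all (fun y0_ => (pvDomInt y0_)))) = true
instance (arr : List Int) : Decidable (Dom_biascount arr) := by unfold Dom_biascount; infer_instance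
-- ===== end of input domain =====

-- B sorts the list and inspects the median-position element instead of keeping counters
-- (an alternative algorithm of the same answer, not claimed faster).

-- ===== PORT A =====
def biascount (arr : List Int) : Int :=
  let st := arr.foldl (fun (s : Int × Int) i =>
    if i < 0 then (s.1 + 1, s.2) else (s.1, s.2 + 1)) (0, 0)
  if st.1 > st.2 then 0 else 1

-- ===== PORT B =====
-- B: sorted(arr)[len(arr)//2] is negative iff negatives are a strict majority.
-- The index len(arr)//2 is provably in range (arr ≠ []), so .getD 0 only makes the lookup total.
def biascount_alt (arr : List Int) : Int :=
  if arr = [] then 1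
  else
    let s := PySem.List.sorted arr (fun x => x) false
    if (PySem.List.pyGet? s (PySem.Int.floordiv arr.length 2)).getD 0 < 0 then 0 else 1

-- ===== PRECONDITION & SPEC =====
def Spec_biascount (arr : List Int) (out : Int) : Prop := out = biascount_alt arr
instance (arr : List Int) (out : Int) : Decidable (Spec_biascount arr out) := by unfold Spec_biascount; infer_instance

-- ===== CLAIM (what is proved, stated in full; the proofs are below) =====
def Claim_equal_biascount : Prop := ∀ (arr : List Int), Dom_biascount arr → Spec_biascount arr (biascount arr)

-- ===== LEMMAS AND PROOFS =====

-- A's fold counts the negatives and the non-negatives.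
lemma biascount_fold (arr : List Int) (n p : Int) :
    arr.foldl (fun (s : Int × Int) i =>
      if i < 0 then (s.1 + 1, s.2) else (s.1, s.2 + 1)) (n, p)
      = (n + (arr.countP (fun i => decide (i < 0)) : Int),
         p + ((arr.length : Int) - (arr.countP (fun i => decide (i < 0)) : Int))) := by
  induction arr generalizing n p with
  | nil => simp
  | cons x xs ih =>
    by_cases h : x < 0 <;> simp [List.foldl, List.countP_cons, h, ih] <;> push_cast <;> ring

-- In a ≤-sorted list, the element at index i is negative iff i is below the negative count.
lemma sorted_neg_iff (s : List Int) (hs : s.Pairwise (· ≤ ·)) (i : Nat) (hi : i < s.length) :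
    s[i] < 0 ↔ i < s.countP (fun x => decide (x < 0)) := by
  induction s generalizing i with
  | nil => simp at hi
  | cons x xs ih =>
    rcases List.pairwise_cons.mp hs with ⟨hx, hxs⟩
    by_cases hneg : x < 0
    · cases i with
      | zero => simpa [List.countP_cons, hneg] using Nat.succ_pos _
      | succ j =>
        have hj : j < xs.length := by simpa using hi
        simpa [hneg, Nat.succ_lt_succ_iff] using ih hxs j hj
    · have hall : xs.countP (fun x => decide (x < 0)) = 0 := by
        rw [List.countP_eq_zero]
        intro a ha
        have := hx a ha
        simp; omega
      cases i with
      | zero => simp [List.countP_cons, hall, hneg]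
      | succ j =>
        have hj : j < xs.length := by simpa using hi
        have h2 := ih hxs j hj
        rw [hall] at h2
        simp only [List.getElem_cons_succ, List.countP_cons, hall]
        rw [h2]
        simp [hneg]

-- ===== VERDICT (by name: the statement is the Claim_ definition above) =====
theorem biascount_spec : Claim_equal_biascount := by
  intro arr _
  unfold Spec_biascount biascount biascount_alt
  rcases eq_or_ne arr [] with rfl | hne
  · simp
  · rw [if_neg hne, biascount_fold]
    simp only [zero_add]
    set s := PySem.List.sorted arr (fun x => x) false with hsdef
    have hperm : s.Perm arr := PySem.List.sorted_perm arr (fun x => x) false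
    have hlen : s.length = arr.length := hperm.length_eq
    have hcount : s.countP (fun x => decide (x < 0)) = arr.countP (fun x => decide (x < 0)) :=
      hperm.countP_eq _
    have hpos : 0 < arr.length := List.length_pos_iff.mpr hne
    have hmid : PySem.Int.floordiv (arr.length : Int) 2 = ((arr.length / 2 : Nat) : Int) := by
      simp only [PySem.Int.floordiv, Int.fdiv_eq_ediv]
      omega
    have hidx : arr.length / 2 < s.length := by omega
    have hget : PySem.List.pyGet? s (PySem.Int.floordiv (arr.length : Int) 2)
        = some s[arr.length / 2] := by
      rw [hmid, PySem.List.pyGet?_natCast, List.getElem?_eq_getElem hidx]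
    rw [hget]
    have hsorted : s.Pairwise (· ≤ ·) := by
      simpa using PySem.List.sorted_pairwise arr (fun x => x)
    have hiff := sorted_neg_iff s hsorted (arr.length / 2) hidx
    rw [hcount] at hiff
    simp only [Option.getD_some]
    by_cases h : s[arr.length / 2] < 0
    · have hk : arr.length / 2 < arr.countP (fun x => decide (x < 0)) := hiff.mp h
      rw [if_pos h, if_pos (by omega)]
    · have hk : ¬ arr.length / 2 < arr.countP (fun x => decide (x < 0)) := fun hh => h (hiff.mpr hh)
      have hle := List.countP_le_length (l := arr) (p := fun x => decide (x < 0))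
      rw [if_neg h, if_neg (by omega)]
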